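-- pv_equiv track=rewrite | github.com/scarlet2131/DSA | TCS-Codevita/jw.py | justify_words
-- ===== SOURCE A (Python) =====
-- def justify_words(words, N, M):
--     dp = [[0] * (M + 1) for _ in range(N + 1)]
--
--     for i in range(1, N + 1):
--         for j in range(1, M + 1):
--             max_words = 0
--             for k in range(j):
--                 if len(words[i - 1]) <= j - k:
--                     max_words = max(max_words, dp[i - 1][k] + 1)
--             dp[i][j] = max_words
--
--     return dp[N][M]
-- ===== SOURCE B (Python) =====
-- def justify_words(words, N, M):
--     prev = [0] * (M + 1)
--     for w in words[:N]:
--         L = len(w)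
--         pm = []
--         run = 0
--         for v in prev:
--             run = max(run, v)
--             pm.append(run)
--         cur = [0] * (M + 1)
--         for j in range(1, M + 1):
--             if min(j - 1, j - L) >= 0:
--                 cur[j] = pm[min(j - 1, j - L)] + 1
--         prev = cur
--     return prev[M]
-- ===== Notes on version B (the rewrite author's own statement) =====
-- stated objective: faster
-- what changed: A recomputes, for every cell (i,j), a scan over all k<j of the previous DP row; B keeps only the previous row, builds its prefix-maximum array once per word, and fills each cell with one O(1) lookup pm[min(j-1, j-len(w))].
import Mathlib
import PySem

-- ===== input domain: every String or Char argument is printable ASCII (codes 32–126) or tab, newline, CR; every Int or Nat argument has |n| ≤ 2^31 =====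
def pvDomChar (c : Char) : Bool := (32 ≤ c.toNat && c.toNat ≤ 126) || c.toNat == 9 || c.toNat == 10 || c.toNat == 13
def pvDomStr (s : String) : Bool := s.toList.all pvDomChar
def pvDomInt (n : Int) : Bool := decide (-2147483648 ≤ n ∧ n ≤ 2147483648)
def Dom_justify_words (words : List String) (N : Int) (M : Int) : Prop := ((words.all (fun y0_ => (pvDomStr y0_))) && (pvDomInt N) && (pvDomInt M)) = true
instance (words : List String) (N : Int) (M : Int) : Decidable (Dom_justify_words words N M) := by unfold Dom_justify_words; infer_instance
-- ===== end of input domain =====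

-- B replaces A's O(N*M^2) inner scan over the previous DP row by a prefix-maximum
-- array per row (O(N*M)); equivalence of return values is proved on Pre_ below.

-- ===== PORT A =====
-- the k-loop of A: max_words over k in range(j)
def jwInnerA (w : String) (prevRow : List Int) (j : Int) : Int :=
  (PySem.List.pyRange 0 j).foldl
    (fun max_words k =>
      if PySem.Str.len w ≤ j - k then max max_words (PySem.List.pyGetD prevRow k 0 + 1)
      else max_words) 0

-- the j-loop of A for one value of i, mutating row i of dp
def jwStepA (words : List String) (M : Int) (dp : List (List Int)) (i : Int) : List (List Int) :=
  (PySem.List.pyRange 1 (M + 1)).foldl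
    (fun dp j =>
      PySem.List.pySetD dp i
        (PySem.List.pySetD (PySem.List.pyGetD dp i []) j
          (jwInnerA (PySem.List.pyGetD words (i - 1) "") (PySem.List.pyGetD dp (i - 1) []) j)))
    dp

def justify_words (words : List String) (N : Int) (M : Int) : Int :=
  let dp := (PySem.List.pyRange 1 (N + 1)).foldl (jwStepA words M)
    (List.replicate (N + 1).toNat (List.replicate (M + 1).toNat (0 : Int)))
  PySem.List.pyGetD (PySem.List.pyGetD dp N []) M 0

-- ===== PORT B =====
-- one step of Source B's pm-building loop: run = max(run, v); pm.append(run)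
def jwPmStep (st : Int × List Int) (v : Int) : Int × List Int :=
  (max st.1 v, st.2 ++ [max st.1 v])

-- one iteration of Source B's outer loop: prefix maxima of prev, then fill cur
def jwStepB (M : Int) (prev : List Int) (w : String) : List Int :=
  let pm := (prev.foldl jwPmStep (0, [])).2
  (PySem.List.pyRange 1 (M + 1)).foldl
    (fun cur j =>
      if 0 ≤ min (j - 1) (j - PySem.Str.len w) then
        PySem.List.pySetD cur j
          (PySem.List.pyGetD pm (min (j - 1) (j - PySem.Str.len w)) 0 + 1)
      else cur)
    (List.replicate (M + 1).toNat (0 : Int))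

def justify_words_alt (words : List String) (N : Int) (M : Int) : Int :=
  let prev := (PySem.List.slice words none (some N)).foldl (jwStepB M)
    (List.replicate (M + 1).toNat (0 : Int))
  PySem.List.pyGetD prev M 0

-- ===== PRECONDITION & SPEC =====
-- Pre_ is exactly where A returns: A raises IndexError when N < 0 or M < 0
-- (negative index into dp) or when 1 ≤ M and N > len(words) (words[i-1] out of range).
def Pre_justify_words (words : List String) (N : Int) (M : Int) : Prop :=
  0 ≤ N ∧ 0 ≤ M ∧ (M = 0 ∨ N ≤ (words.length : Int))
instance (words : List String) (N : Int) (M : Int) : Decidable (Pre_justify_words words N M) := by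
  unfold Pre_justify_words; infer_instance

def pvWitness_justify_words : List String × Int × Int := (["ab", "c"], 2, 5)

def Spec_justify_words (words : List String) (N : Int) (M : Int) (out : Int) : Prop := out = justify_words_alt words N M
instance (words : List String) (N : Int) (M : Int) (out : Int) : Decidable (Spec_justify_words words N M out) := by unfold Spec_justify_words; infer_instance

-- ===== CLAIM (what is proved, stated in full; the proofs are below) =====
def Claim_equal_justify_words : Prop := ∀ (words : List String) (N : Int) (M : Int), Dom_justify_words words N M → Pre_justify_words words N M → Spec_justify_words words N M (justify_words words N M)


-- ===== LEMMAS AND PROOFS =====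

-- prefix maximum of the first h+1 entries of prev, starting value 0 (Source B's run)
def jwPmax (prev : List Int) (h : Nat) : Int := (prev.take (h + 1)).foldl max 0

-- functional form of Source B's pm list
def jwPmList (r : Int) : List Int → List Int
  | [] => []
  | v :: t => max r v :: jwPmList (max r v) t

-- B's row recursion (fold of jwStepB from the all-zero row)
def jwRows (M : Int) (ws : List String) : List Int :=
  ws.foldl (jwStepB M) (List.replicate (M + 1).toNat (0 : Int))

lemma jw_pyGetD_nonneg (xs : List Int) (i : Int) (h : ∀ x ∈ xs, 0 ≤ x) :
    0 ≤ PySem.List.pyGetD xs i 0 := by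
  rcases hg : PySem.List.pyGet? xs i with _ | v
  · rw [PySem.List.pyGetD_of_none _ _ _ hg]
  · have hv : PySem.List.pyGetD xs i 0 = v := by simp [PySem.List.pyGetD, hg]
    rw [hv]; exact h v (PySem.List.mem_of_pyGet?_eq_some xs hg)

lemma jw_pm_snd : ∀ (prev : List Int) (r : Int) (acc : List Int),
    (prev.foldl jwPmStep (r, acc)).2 = acc ++ jwPmList r prev := by
  intro prev
  induction prev with
  | nil => intro r acc; simp [jwPmList]
  | cons v t ih =>
    intro r acc
    simp only [List.foldl_cons, jwPmStep, jwPmList]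
    rw [ih]
    simp

lemma jw_pmList_ge : ∀ (prev : List Int) (r : Int), ∀ x ∈ jwPmList r prev, r ≤ x := by
  intro prev
  induction prev with
  | nil => intro r x hx; simp [jwPmList] at hx
  | cons v t ih =>
    intro r x hx
    simp only [jwPmList, List.mem_cons] at hx
    rcases hx with rfl | hx
    · exact le_max_left _ _
    · exact le_trans (le_max_left _ _) (ih (max r v) x hx)

lemma jw_pmList_get : ∀ (prev : List Int) (r : Int) (h : Nat), h < prev.length →
    (jwPmList r prev)[h]? = some ((prev.take (h + 1)).foldl max r) := by
  intro prev
  induction prev with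
  | nil => intro r h hh; simp at hh
  | cons v t ih =>
    intro r h hh
    cases h with
    | zero => simp [jwPmList]
    | succ m =>
      simp only [jwPmList, List.getElem?_cons_succ]
      rw [ih (max r v) m (by simpa using hh)]
      simp [List.take, List.foldl_cons]

-- the inner k-loop of A computes a prefix maximum of prev plus one
lemma jw_innerA_eq (w : String) (prev : List Int) (j : Int) (h1 : 1 ≤ j)
    (hj : j ≤ (prev.length : Int)) (hpos : ∀ x ∈ prev, 0 ≤ x) :
    jwInnerA w prev j =
      if 0 ≤ min (j - 1) (j - PySem.Str.len w)
      then jwPmax prev (min (j - 1) (j - PySem.Str.len w)).toNat + 1 else 0 := by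
  set L := PySem.Str.len w with hL
  have key : ∀ (n : Nat), (n : Int) ≤ j →
      (PySem.List.pyRange 0 (n : Int)).foldl
        (fun max_words k =>
          if L ≤ j - k then max max_words (PySem.List.pyGetD prev k 0 + 1)
          else max_words) 0 =
      if 0 ≤ min ((n : Int) - 1) (j - L)
      then jwPmax prev (min ((n : Int) - 1) (j - L)).toNat + 1 else 0 := by
    intro n
    induction n with
    | zero =>
      intro _
      rw [PySem.List.pyRange_one_eq_nil (by omega)]
      have h0 : ¬ (0 : Int) ≤ min ((0 : Int) - 1) (j - L) := by omega
      rw [List.foldl_nil]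
      simp only [Nat.cast_zero]
      rw [if_neg h0]
    | succ m ihm =>
      intro hn
      have hm : (m : Int) ≤ j := by push_cast at hn ⊢; omega
      have hrange : PySem.List.pyRange 0 ((m : Int) + 1) =
          PySem.List.pyRange 0 (m : Int) ++ [(m : Int)] :=
        PySem.List.pyRange_one_succ_right (by omega)
      push_cast
      rw [hrange, List.foldl_append, ihm hm]
      simp only [List.foldl_cons, List.foldl_nil]
      have hmlt : m < prev.length := by push_cast at hn hj; omega
      have hget : PySem.List.pyGetD prev (m : Int) 0 = prev[m] := by
        rw [PySem.List.pyGetD_natCast, List.getD_eq_getElem _ _ hmlt]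
      have hsucc : jwPmax prev m = ((prev.take m).foldl max 0) ⊔ prev[m] := by
        unfold jwPmax
        rw [List.take_succ_eq_append_getElem hmlt, List.foldl_append]
        simp
      by_cases hc : L ≤ j - (m : Int)
      · rw [if_pos hc, hget]
        have hcond : (0 : Int) ≤ min ((m : Int) + 1 - 1) (j - L) := by omega
        rw [if_pos hcond]
        have hmin1 : (min ((m : Int) + 1 - 1) (j - L)).toNat = m := by omega
        rw [hmin1]
        by_cases hm0 : (0 : Int) ≤ min ((m : Int) - 1) (j - L)
        · rw [if_pos hm0]
          have hm1 : 1 ≤ m := by omega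
          have hmin2 : (min ((m : Int) - 1) (j - L)).toNat = m - 1 := by omega
          rw [hmin2]
          have hpred : jwPmax prev (m - 1) = (prev.take m).foldl max 0 := by
            unfold jwPmax
            congr 2
            omega
          omega
        · rw [if_neg hm0]
          have hm0' : m = 0 := by omega
          subst hm0'
          have hp0 : 0 ≤ prev[0] := hpos _ (List.getElem_mem hmlt)
          simp only [List.take_zero, List.foldl_nil] at hsucc
          omega
      · rw [if_neg hc]
        have : min ((m : Int) + 1 - 1) (j - L) = min ((m : Int) - 1) (j - L) := by omega
        rw [this]
  have hjn : ((j.toNat : Nat) : Int) = j := Int.toNat_of_nonneg (by omega)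
  have k2 := key j.toNat (by omega)
  rw [hjn] at k2
  unfold jwInnerA
  rw [← hL]
  exact k2

-- get?-characterization of A's row fold (set at each j in l)
lemma jw_afold_get (g : Int → Int) :
    ∀ (l : List Int) (row : List Int) (t : Nat), (∀ j ∈ l, 1 ≤ j) → t < row.length →
    (l.foldl (fun row j => PySem.List.pySetD row j (g j)) row)[t]? =
      if (t : Int) ∈ l then some (g t) else row[t]? := by
  intro l
  induction l with
  | nil => intro row t _ _; simp
  | cons j l ih =>
    intro row t hl ht
    have hj1 : 1 ≤ j := hl j (List.mem_cons_self ..)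
    simp only [List.foldl_cons]
    rw [PySem.List.pySetD_of_nonneg _ _ (by omega)]
    rw [ih _ t (fun x hx => hl x (List.mem_cons_of_mem _ hx)) (by simpa using ht)]
    by_cases hmem : (t : Int) ∈ l
    · simp [hmem]
    · rw [if_neg hmem]
      by_cases hjt : j.toNat = t
      · have hjt' : j = (t : Int) := by omega
        rw [if_pos (by simp [hjt'])]
        rw [← hjt, List.getElem?_set_self (by omega)]
        have hjj : ((j.toNat : Nat) : Int) = j := by omega
        rw [hjj, hjt']
      · rw [List.getElem?_set_ne hjt]
        rw [if_neg (by
          intro h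
          rcases List.mem_cons.mp h with h | h
          · omega
          · exact hmem h)]

lemma jw_afold_len (g : Int → Int) :
    ∀ (l : List Int) (row : List Int),
      (l.foldl (fun row j => PySem.List.pySetD row j (g j)) row).length = row.length := by
  intro l
  induction l with
  | nil => intro row; simp
  | cons j l ih => intro row; simp only [List.foldl_cons]; rw [ih]; exact PySem.List.length_pySetD ..

-- get?-characterization of B's guarded row fold
lemma jw_gfold_get (pm : List Int) (L : Int) :
    ∀ (l : List Int) (row : List Int) (t : Nat), (∀ j ∈ l, 1 ≤ j) → t < row.length →
    (l.foldl (fun cur j =>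
        if 0 ≤ min (j - 1) (j - L) then
          PySem.List.pySetD cur j (PySem.List.pyGetD pm (min (j - 1) (j - L)) 0 + 1)
        else cur) row)[t]? =
      if (t : Int) ∈ l ∧ 0 ≤ min ((t : Int) - 1) ((t : Int) - L)
      then some (PySem.List.pyGetD pm (min ((t : Int) - 1) ((t : Int) - L)) 0 + 1)
      else row[t]? := by
  intro l
  induction l with
  | nil => intro row t _ _; simp
  | cons j l ih =>
    intro row t hl ht
    have hj1 : 1 ≤ j := hl j (List.mem_cons_self ..)
    simp only [List.foldl_cons]
    have hlen2 : ∀ (r : List Int),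
        (if 0 ≤ min (j - 1) (j - L)
         then PySem.List.pySetD r j (PySem.List.pyGetD pm (min (j - 1) (j - L)) 0 + 1)
         else r).length = r.length := by
      intro r; split
      · exact PySem.List.length_pySetD ..
      · rfl
    rw [ih _ t (fun x hx => hl x (List.mem_cons_of_mem _ hx)) (by rw [hlen2]; exact ht)]
    by_cases hmem : (t : Int) ∈ l
    · by_cases hcond : 0 ≤ min ((t : Int) - 1) ((t : Int) - L)
      · rw [if_pos ⟨hmem, hcond⟩, if_pos ⟨List.mem_cons_of_mem _ hmem, hcond⟩]
      · have h1 : ¬ ((t : Int) ∈ l ∧ 0 ≤ min ((t : Int) - 1) ((t : Int) - L)) :=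
          fun h => hcond h.2
        have h2 : ¬ ((t : Int) ∈ j :: l ∧ 0 ≤ min ((t : Int) - 1) ((t : Int) - L)) :=
          fun h => hcond h.2
        rw [if_neg h1, if_neg h2]
        by_cases hjt : j = (t : Int)
        · subst hjt; rw [if_neg hcond]
        · split
          · rw [PySem.List.pySetD_of_nonneg _ _ (by omega),
              List.getElem?_set_ne (by omega)]
          · rfl
    · by_cases hjt : j = (t : Int)
      · subst hjt
        by_cases hcond : 0 ≤ min ((t : Int) - 1) ((t : Int) - L)
        · have h1 : ¬ ((t : Int) ∈ l ∧ 0 ≤ min ((t : Int) - 1) ((t : Int) - L)) :=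
            fun h => hmem h.1
          have h2 : (t : Int) ∈ (t : Int) :: l ∧ 0 ≤ min ((t : Int) - 1) ((t : Int) - L) :=
            ⟨List.mem_cons_self .., hcond⟩
          rw [if_neg h1, if_pos h2, if_pos hcond]
          rw [PySem.List.pySetD_of_nonneg _ _ (by omega)]
          have hjj : ((t : Int)).toNat = t := by omega
          rw [hjj, List.getElem?_set_self ht]
        · have h1 : ¬ ((t : Int) ∈ l ∧ 0 ≤ min ((t : Int) - 1) ((t : Int) - L)) :=
            fun h => hcond h.2
          have h2 : ¬ ((t : Int) ∈ (t : Int) :: l ∧ 0 ≤ min ((t : Int) - 1) ((t : Int) - L)) :=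
            fun h => hcond h.2
          rw [if_neg h1, if_neg h2, if_neg hcond]
      · have h2 : ¬ ((t : Int) ∈ j :: l ∧ 0 ≤ min ((t : Int) - 1) ((t : Int) - L)) := by
          rintro ⟨h, -⟩
          rcases List.mem_cons.mp h with h | h
          · exact hjt h.symm
          · exact hmem h
        have h1 : ¬ ((t : Int) ∈ l ∧ 0 ≤ min ((t : Int) - 1) ((t : Int) - L)) :=
          fun h => hmem h.1
        rw [if_neg h1, if_neg h2]
        split
        · rw [PySem.List.pySetD_of_nonneg _ _ (by omega),
            List.getElem?_set_ne (by omega)]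
        · rfl

lemma jw_gfold_len (pm : List Int) (L : Int) :
    ∀ (l : List Int) (row : List Int),
      (l.foldl (fun cur j =>
        if 0 ≤ min (j - 1) (j - L) then
          PySem.List.pySetD cur j (PySem.List.pyGetD pm (min (j - 1) (j - L)) 0 + 1)
        else cur) row).length
      = row.length := by
  intro l
  induction l with
  | nil => intro row; simp
  | cons j l ih =>
    intro row
    simp only [List.foldl_cons]
    rw [ih]
    split
    · exact PySem.List.length_pySetD ..
    · rfl

lemma jw_stepB_len (M : Int) (prev : List Int) (w : String) :
    (jwStepB M prev w).length = (M + 1).toNat := by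
  unfold jwStepB
  rw [jw_gfold_len]
  simp

lemma jw_stepB_nonneg (M : Int) (prev : List Int) (w : String) :
    ∀ x ∈ jwStepB M prev w, 0 ≤ x := by
  unfold jwStepB
  have hpm : ∀ x ∈ (prev.foldl jwPmStep (0, [])).2, 0 ≤ x := by
    rw [jw_pm_snd]
    simpa using jw_pmList_ge prev 0
  generalize (prev.foldl jwPmStep ((0 : Int), ([] : List Int))).2 = pm at hpm
  have main : ∀ (l : List Int) (cur : List Int), (∀ x ∈ cur, 0 ≤ x) →
      ∀ x ∈ l.foldl (fun cur j =>
        if 0 ≤ min (j - 1) (j - PySem.Str.len w) then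
          PySem.List.pySetD cur j
            (PySem.List.pyGetD pm (min (j - 1) (j - PySem.Str.len w)) 0 + 1)
        else cur) cur,
        0 ≤ x := by
    intro l
    induction l with
    | nil => intro cur h x hx; exact h x hx
    | cons j l ih =>
      intro cur h x hx
      refine ih _ ?_ x hx
      intro y hy
      simp only at hy
      split at hy
      · rw [PySem.List.pySetD_of_nonneg _ _ (by omega)] at hy
        · rcases List.mem_or_eq_of_mem_set hy with hy | rfl
          · exact h y hy
          · have := jw_pyGetD_nonneg pm (min (j - 1) (j - PySem.Str.len w)) hpm
            omega
      · exact h y hy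
  intro x hx
  exact main _ _ (by simp) x hx

-- jwStepB with its pm list named
lemma jw_stepB_eq (M : Int) (prev : List Int) (w : String) :
    jwStepB M prev w =
      (PySem.List.pyRange 1 (M + 1)).foldl
        (fun cur j =>
          if 0 ≤ min (j - 1) (j - PySem.Str.len w) then
            PySem.List.pySetD cur j
              (PySem.List.pyGetD (jwPmList 0 prev) (min (j - 1) (j - PySem.Str.len w)) 0 + 1)
          else cur)
        (List.replicate (M + 1).toNat (0 : Int)) := by
  simp only [jwStepB]
  rw [show (prev.foldl jwPmStep ((0 : Int), ([] : List Int))).2 = jwPmList 0 prev by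
    simpa using jw_pm_snd prev 0 []]

-- A's row fold (computed from row prev) equals B's row step
lemma jw_rowA_eq_stepB (M : Int) (w : String) (prev : List Int)
    (hlen : prev.length = (M + 1).toNat) (hpos : ∀ x ∈ prev, 0 ≤ x) :
    (PySem.List.pyRange 1 (M + 1)).foldl
      (fun row j => PySem.List.pySetD row j (jwInnerA w prev j))
      (List.replicate (M + 1).toNat (0 : Int)) = jwStepB M prev w := by
  rw [jw_stepB_eq]
  apply List.ext_getElem?
  intro t
  by_cases ht : t < (M + 1).toNat
  · rw [jw_afold_get _ _ _ _ (fun j hj => (PySem.List.mem_pyRange_one.mp hj).1) (by simpa using ht)]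
    rw [jw_gfold_get _ _ _ _ _ (fun j hj => (PySem.List.mem_pyRange_one.mp hj).1) (by simpa using ht)]
    by_cases hm : (t : Int) ∈ PySem.List.pyRange 1 (M + 1)
    · obtain ⟨h1t, htM⟩ := PySem.List.mem_pyRange_one.mp hm
      rw [if_pos hm]
      have hlenI : (t : Int) ≤ (prev.length : Int) := by rw [hlen]; omega
      rw [jw_innerA_eq w prev (t : Int) h1t hlenI hpos]
      by_cases hc : 0 ≤ min ((t : Int) - 1) ((t : Int) - PySem.Str.len w)
      · rw [if_pos hc, if_pos ⟨hm, hc⟩]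
        have hhiN : (min ((t : Int) - 1) ((t : Int) - PySem.Str.len w)).toNat < prev.length := by
          omega
        have hpm : PySem.List.pyGetD (jwPmList 0 prev)
            (min ((t : Int) - 1) ((t : Int) - PySem.Str.len w)) 0
            = jwPmax prev (min ((t : Int) - 1) ((t : Int) - PySem.Str.len w)).toNat := by
          conv_lhs => rw [show (min ((t : Int) - 1) ((t : Int) - PySem.Str.len w)) =
            (((min ((t : Int) - 1) ((t : Int) - PySem.Str.len w)).toNat : Nat) : Int) by omega]
          rw [PySem.List.pyGetD_natCast, List.getD_eq_getElem?_getD,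
            jw_pmList_get prev 0 _ hhiN]
          rfl
        rw [hpm]
      · rw [if_neg hc, if_neg (fun h => hc h.2), List.getElem?_replicate, if_pos ht]
    · rw [if_neg hm, if_neg (fun h => hm h.1)]
  · rw [List.getElem?_eq_none (le_of_not_gt (by
        rw [jw_afold_len]; simpa using ht)),
      List.getElem?_eq_none (le_of_not_gt (by
        rw [jw_gfold_len]; simpa using ht))]

-- one outer iteration of A only rewrites row i of dp
lemma jw_stepA_set (words : List String) (i : Int) (h1 : 1 ≤ i) :
    ∀ (l : List Int) (dp : List (List Int)), i.toNat < dp.length →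
    l.foldl (fun dp j =>
        PySem.List.pySetD dp i
          (PySem.List.pySetD (PySem.List.pyGetD dp i []) j
            (jwInnerA (PySem.List.pyGetD words (i - 1) "") (PySem.List.pyGetD dp (i - 1) []) j))) dp
    = dp.set i.toNat
        (l.foldl (fun row j =>
            PySem.List.pySetD row j
              (jwInnerA (PySem.List.pyGetD words (i - 1) "") (PySem.List.pyGetD dp (i - 1) []) j))
          (PySem.List.pyGetD dp i [])) := by
  intro l
  induction l with
  | nil =>
    intro dp hlen
    simp only [List.foldl_nil]
    have hget : PySem.List.pyGetD dp i [] = dp[i.toNat] :=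
      PySem.List.pyGetD_eq_getElem dp [] (by omega) (by omega)
    rw [hget, List.set_getElem_self]
  | cons j l ih =>
    intro dp hlen
    simp only [List.foldl_cons]
    have h0i : (0 : Int) ≤ i := by omega
    have hset : PySem.List.pySetD dp i
        (PySem.List.pySetD (PySem.List.pyGetD dp i []) j
          (jwInnerA (PySem.List.pyGetD words (i - 1) "") (PySem.List.pyGetD dp (i - 1) []) j))
        = dp.set i.toNat
          (PySem.List.pySetD (PySem.List.pyGetD dp i []) j
            (jwInnerA (PySem.List.pyGetD words (i - 1) "") (PySem.List.pyGetD dp (i - 1) []) j)) :=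
      PySem.List.pySetD_of_nonneg _ _ h0i
    rw [hset]
    set R1 := PySem.List.pySetD (PySem.List.pyGetD dp i []) j
      (jwInnerA (PySem.List.pyGetD words (i - 1) "") (PySem.List.pyGetD dp (i - 1) []) j) with hR1
    have hlen' : i.toNat < (dp.set i.toNat R1).length := by simpa using hlen
    rw [ih (dp.set i.toNat R1) hlen']
    have e1 : PySem.List.pyGetD (dp.set i.toNat R1) (i - 1) []
        = PySem.List.pyGetD dp (i - 1) [] := by
      rw [show i - 1 = (((i - 1).toNat : Nat) : Int) by omega]
      rw [PySem.List.pyGetD_natCast, PySem.List.pyGetD_natCast,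
        List.getD_eq_getElem?_getD, List.getD_eq_getElem?_getD,
        List.getElem?_set_ne (by omega)]
    have e2 : PySem.List.pyGetD (dp.set i.toNat R1) i [] = R1 := by
      conv_lhs => rw [show i = ((i.toNat : Nat) : Int) by omega]
      rw [PySem.List.pyGetD_natCast, List.getD_eq_getElem?_getD]
      simp only [Int.toNat_natCast]
      rw [List.getElem?_set_self (by simpa using hlen)]
      rfl
    rw [e1, e2, List.set_set]

lemma jw_rows_aux (M : Int) : ∀ (ws : List String) (init : List Int),
    init.length = (M + 1).toNat → (∀ x ∈ init, 0 ≤ x) →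
    (ws.foldl (jwStepB M) init).length = (M + 1).toNat
      ∧ ∀ x ∈ ws.foldl (jwStepB M) init, 0 ≤ x := by
  intro ws
  induction ws with
  | nil => intro init h1 h2; exact ⟨h1, h2⟩
  | cons w ws ih =>
    intro init h1 h2
    simp only [List.foldl_cons]
    exact ih (jwStepB M init w) (jw_stepB_len M init w) (jw_stepB_nonneg M init w)

lemma jw_rows_length (M : Int) (ws : List String) : (jwRows M ws).length = (M + 1).toNat :=
  (jw_rows_aux M ws _ (by simp) (by intro x hx; rw [List.eq_of_mem_replicate hx])).1

lemma jw_rows_nonneg (M : Int) (ws : List String) : ∀ x ∈ jwRows M ws, 0 ≤ x :=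
  (jw_rows_aux M ws _ (by simp) (by intro x hx; rw [List.eq_of_mem_replicate hx])).2

lemma jw_rows_succ (M : Int) (ws : List String) (t : Nat) (ht : t < ws.length) :
    jwRows M (ws.take (t + 1)) = jwStepB M (jwRows M (ws.take t)) ws[t] := by
  unfold jwRows
  rw [List.take_succ_eq_append_getElem ht, List.foldl_append]
  simp

-- main invariant: after the first t outer iterations of A, row u of dp is
-- B's row after u words (u ≤ t), the untouched rows are still zero
lemma jw_main (words : List String) (M N : Int) (hN : 0 ≤ N)
    (hw : N ≤ (words.length : Int)) :
    ∀ (t : Nat), (t : Int) ≤ N →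
    ((PySem.List.pyRange 1 ((t : Int) + 1)).foldl (jwStepA words M)
        (List.replicate (N + 1).toNat (List.replicate (M + 1).toNat (0 : Int)))).length
      = (N + 1).toNat
    ∧ ∀ u : Nat, u < (N + 1).toNat →
      ((PySem.List.pyRange 1 ((t : Int) + 1)).foldl (jwStepA words M)
        (List.replicate (N + 1).toNat (List.replicate (M + 1).toNat (0 : Int))))[u]?
        = some (if u ≤ t then jwRows M (words.take u) else List.replicate (M + 1).toNat 0) := by
  intro t
  induction t with
  | zero =>
    intro _
    rw [PySem.List.pyRange_one_eq_nil (by omega)]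
    simp only [List.foldl_nil]
    refine ⟨by simp, ?_⟩
    intro u hu
    rw [List.getElem?_replicate, if_pos hu]
    congr 1
    split
    · next h =>
      have hu0 : u = 0 := by omega
      subst hu0
      simp [jwRows]
    · rfl
  | succ t ih =>
    intro ht1
    have htN : (t : Int) ≤ N := by push_cast at ht1 ⊢; omega
    obtain ⟨ihlen, ihget⟩ := ih htN
    have hrange : PySem.List.pyRange 1 ((t : Int) + 1 + 1)
        = PySem.List.pyRange 1 ((t : Int) + 1) ++ [(t : Int) + 1] :=
      PySem.List.pyRange_one_succ_right (by omega)
    push_cast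
    rw [hrange, List.foldl_append]
    simp only [List.foldl_cons, List.foldl_nil]
    set dpT := (PySem.List.pyRange 1 ((t : Int) + 1)).foldl (jwStepA words M)
      (List.replicate (N + 1).toNat (List.replicate (M + 1).toNat (0 : Int))) with hdpT
    have hi1 : (1 : Int) ≤ (t : Int) + 1 := by omega
    have hitoNat : ((t : Int) + 1).toNat = t + 1 := by omega
    have hlen : ((t : Int) + 1).toNat < dpT.length := by rw [ihlen, hitoNat]; omega
    have hstep := jw_stepA_set words ((t : Int) + 1) hi1 (PySem.List.pyRange 1 (M + 1)) dpT hlen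
    have htw : t < words.length := by push_cast at ht1; omega
    have hgetprev : PySem.List.pyGetD dpT ((t : Int) + 1 - 1) [] = jwRows M (words.take t) := by
      rw [show (t : Int) + 1 - 1 = ((t : Nat) : Int) by omega]
      rw [PySem.List.pyGetD_natCast, List.getD_eq_getElem?_getD, ihget t (by omega)]
      simp
    have hgetcur : PySem.List.pyGetD dpT ((t : Int) + 1) []
        = List.replicate (M + 1).toNat 0 := by
      rw [show (t : Int) + 1 = ((t + 1 : Nat) : Int) by push_cast; omega]
      rw [PySem.List.pyGetD_natCast, List.getD_eq_getElem?_getD, ihget (t + 1) (by omega)]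
      simp
    have hword : PySem.List.pyGetD words ((t : Int) + 1 - 1) "" = words[t] := by
      rw [show (t : Int) + 1 - 1 = ((t : Nat) : Int) by omega]
      rw [PySem.List.pyGetD_natCast, List.getD_eq_getElem _ _ htw]
    rw [show jwStepA words M dpT ((t : Int) + 1) = _ from hstep]
    rw [hgetprev, hgetcur, hword]
    rw [jw_rowA_eq_stepB M words[t] (jwRows M (words.take t))
      (jw_rows_length M (words.take t)) (jw_rows_nonneg M (words.take t))]
    rw [← jw_rows_succ M words t htw]
    constructor
    · simp [ihlen]
    · intro u hu
      rw [hitoNat]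
      by_cases hut : u = t + 1
      · subst hut
        rw [List.getElem?_set_self (by rw [ihlen]; omega), if_pos (le_refl _)]
      · rw [List.getElem?_set_ne (by omega), ihget u hu]
        congr 1
        by_cases h : u ≤ t
        · rw [if_pos h, if_pos (by omega)]
        · rw [if_neg h, if_neg (by omega)]

lemma jw_stepA_M0 (words : List String) (dp : List (List Int)) (i : Int) :
    jwStepA words 0 dp i = dp := by
  unfold jwStepA
  rw [PySem.List.pyRange_one_eq_nil (by omega)]
  rfl

lemma jw_stepB_M0 (prev : List Int) (w : String) : jwStepB 0 prev w = [0] := by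
  simp only [jwStepB]
  rw [PySem.List.pyRange_one_eq_nil (by omega)]
  rfl

-- ===== VERDICT (by name: the statement is the Claim_ definition above) =====
theorem justify_words_spec : Claim_equal_justify_words := by
  intro words N M _ hpre
  obtain ⟨hN, hM, hd⟩ := hpre
  unfold Spec_justify_words
  by_cases hM0 : M = 0
  · subst hM0
    simp only [justify_words, justify_words_alt]
    have hz : List.replicate ((0 : Int) + 1).toNat (0 : Int) = [0] := rfl
    rw [List.foldl_fixed' (fun i => jw_stepA_M0 words _ i)]
    rw [hz, List.foldl_fixed' (fun w => jw_stepB_M0 [0] w)]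
    have hrow : PySem.List.pyGetD (List.replicate (N + 1).toNat ([0] : List Int)) N [] = [0] := by
      rw [show N = ((N.toNat : Nat) : Int) by omega, PySem.List.pyGetD_natCast,
        List.getD_eq_getElem?_getD, List.getElem?_replicate, if_pos (by omega)]
      rfl
    rw [hrow]
  · have hlenw : N ≤ (words.length : Int) := by
      rcases hd with h | h
      · omega
      · exact h
    simp only [justify_words, justify_words_alt]
    have hNN : ((N.toNat : Nat) : Int) = N := by omega
    set dpF := (PySem.List.pyRange 1 (N + 1)).foldl (jwStepA words M)
      (List.replicate (N + 1).toNat (List.replicate (M + 1).toNat (0 : Int))) with hdpF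
    obtain ⟨hlen, hget⟩ := jw_main words M N hN hlenw N.toNat (by omega)
    rw [hNN] at hlen hget
    rw [← hdpF] at hlen hget
    have hrowN := hget N.toNat (by omega)
    rw [if_pos (le_refl _)] at hrowN
    have hA : PySem.List.pyGetD dpF N [] = jwRows M (words.take N.toNat) := by
      conv_lhs => rw [← hNN]
      rw [PySem.List.pyGetD_natCast, List.getD_eq_getElem?_getD, hrowN]
      rfl
    rw [hA, PySem.List.slice_to words hN]
    rfl
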